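-- pv_equiv track=rewrite | github.com/sagiede/SubtitleCF | DB/preprocess.py | calc_cold_items_list
-- ===== SOURCE A (Python) =====
-- def calc_cold_items_list(user_item_train_pairs):
--     cold_items_t5 = []
--     cold_items_t10 = []
--     cold_items_t20 = []
--
--     i_pop_map_train = {}
--     for u, i in user_item_train_pairs:
--         if i not in i_pop_map_train:
--             i_pop_map_train[i] = 0
--         i_pop_map_train[i] += 1
--
--     for i, c in i_pop_map_train.items():
--         if c <= 5:
--             cold_items_t5.append(i)
--         if c <= 10:
--             cold_items_t10.append(i)
--         if c <= 20:
--             cold_items_t20.append(i)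
--
--     return cold_items_t5, cold_items_t10, cold_items_t20
-- ===== SOURCE B (Python) =====
-- def calc_cold_items_list(user_item_train_pairs):
--     items = [i for _, i in user_item_train_pairs]
--     # distinct items in first-occurrence order; counts obtained by scanning,
--     # and the three cold lists derived as a chain of progressively narrower filters
--     distinct = list(dict.fromkeys(items))
--     cold_items_t20 = [i for i in distinct if items.count(i) <= 20]
--     cold_items_t10 = [i for i in cold_items_t20 if items.count(i) <= 10]
--     cold_items_t5 = [i for i in cold_items_t10 if items.count(i) <= 5]
--     return cold_items_t5, cold_items_t10, cold_items_t20
-- ===== Notes on version B (the rewrite author's own statement) =====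
-- stated objective: alternative
-- what changed: B removes A's counting dict entirely: it deduplicates the item column in first-occurrence order and obtains each count by a list.count scan, deriving the three cold lists as a chain of progressively narrower filters (t5 from t10 from t20) instead of A's single loop with three parallel conditional appends.
import Mathlib
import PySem

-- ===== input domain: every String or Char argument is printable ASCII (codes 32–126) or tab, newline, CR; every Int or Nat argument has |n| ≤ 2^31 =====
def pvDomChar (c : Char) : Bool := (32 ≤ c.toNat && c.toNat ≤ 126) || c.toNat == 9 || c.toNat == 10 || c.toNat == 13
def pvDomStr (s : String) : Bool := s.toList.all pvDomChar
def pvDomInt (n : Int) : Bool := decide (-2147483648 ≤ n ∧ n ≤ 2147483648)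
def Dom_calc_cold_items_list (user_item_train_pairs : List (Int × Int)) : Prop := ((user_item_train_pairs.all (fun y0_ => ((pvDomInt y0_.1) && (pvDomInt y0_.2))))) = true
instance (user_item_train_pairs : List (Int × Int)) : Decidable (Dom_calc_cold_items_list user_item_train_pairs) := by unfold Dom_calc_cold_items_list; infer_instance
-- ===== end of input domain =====

-- B drops A's counting dict: it deduplicates the item column (first-occurrence order),
-- counts by scanning the column, and derives the three cold lists as a chain of nested
-- filters; same return value, proved below.

-- ===== PORT A =====
def calc_cold_items_list (user_item_train_pairs : List (Int × Int)) : List Int × List Int × List Int :=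
  -- i_pop_map_train = {}; for u, i in pairs: if i not in map: map[i] = 0; map[i] += 1
  let i_pop_map_train : PySem.Dict Int Int :=
    user_item_train_pairs.foldl
      (fun d p =>
        let d' := if d.contains p.2 then d else d.insert p.2 0
        d'.insert p.2 (d'.getD p.2 0 + 1))   -- d[i] += 1 (key present, overwrite in place)
      PySem.Dict.empty
  -- for i, c in map.items(): three independent threshold appends
  i_pop_map_train.items.foldl
    (fun (acc : List Int × List Int × List Int) p =>
      (if p.2 ≤ 5 then acc.1 ++ [p.1] else acc.1,
       if p.2 ≤ 10 then acc.2.1 ++ [p.1] else acc.2.1,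
       if p.2 ≤ 20 then acc.2.2 ++ [p.1] else acc.2.2))
    ([], [], [])

-- ===== PORT B =====
def calc_cold_items_list_alt (user_item_train_pairs : List (Int × Int)) : List Int × List Int × List Int :=
  -- items = [i for _, i in pairs]
  let items := user_item_train_pairs.map (·.2)
  -- distinct = list(dict.fromkeys(items))   (PySem.List.dedup is exactly this)
  let distinct := PySem.List.dedup items
  -- chained filters, counts by items.count(i)
  let t20 := distinct.filter (fun i => PySem.List.count items i ≤ 20)
  let t10 := t20.filter (fun i => PySem.List.count items i ≤ 10)
  let t5 := t10.filter (fun i => PySem.List.count items i ≤ 5)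
  (t5, t10, t20)

-- ===== PRECONDITION & SPEC =====
def Spec_calc_cold_items_list (user_item_train_pairs : List (Int × Int)) (out : List Int × List Int × List Int) : Prop := out = calc_cold_items_list_alt user_item_train_pairs
instance (user_item_train_pairs : List (Int × Int)) (out : List Int × List Int × List Int) : Decidable (Spec_calc_cold_items_list user_item_train_pairs out) := by unfold Spec_calc_cold_items_list; infer_instance

-- ===== CLAIM (what is proved, stated in full; the proofs are below) =====
def Claim_equal_calc_cold_items_list : Prop := ∀ (user_item_train_pairs : List (Int × Int)), Dom_calc_cold_items_list user_item_train_pairs → Spec_calc_cold_items_list user_item_train_pairs (calc_cold_items_list user_item_train_pairs)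

-- ===== LEMMAS AND PROOFS =====

-- A's "ensure key, then d[i] += 1" step equals the plain "d[i] = d.get(i, 0) + 1" step.
theorem pv_count_step_eq (d : PySem.Dict Int Int) (i : Int) :
    (if d.contains i then d else d.insert i 0).insert i
      ((if d.contains i then d else d.insert i 0).getD i 0 + 1)
    = d.insert i (d.getD i 0 + 1) := by
  by_cases h : d.contains i = true
  · simp [h]
  · rw [Bool.not_eq_true] at h
    have h0 : d.getD i 0 = 0 := PySem.Dict.getD_of_not_contains d 0 h
    simp [h, PySem.Dict.getD_insert_self, PySem.Dict.insert_insert_self, h0]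

-- Hence A's counting loop over the pairs builds exactly Counter(items).
theorem pv_counts_eq_counter (l : List (Int × Int)) :
    l.foldl
      (fun d p =>
        (if d.contains p.2 then d else d.insert p.2 0).insert p.2
          ((if d.contains p.2 then d else d.insert p.2 0).getD p.2 0 + 1))
      PySem.Dict.empty
    = PySem.Dict.counter (l.map (·.2)) := by
  simp only [pv_count_step_eq]
  rw [← PySem.Dict.foldl_insert_getD_add_one_eq_counter, List.foldl_map]

-- A's three-way append loop over any items list equals chained filters of that list.
theorem pv_fold_eq_filters (l : List (Int × Int)) (a b c : List Int) :
    l.foldl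
      (fun (acc : List Int × List Int × List Int) p =>
        (if p.2 ≤ 5 then acc.1 ++ [p.1] else acc.1,
         if p.2 ≤ 10 then acc.2.1 ++ [p.1] else acc.2.1,
         if p.2 ≤ 20 then acc.2.2 ++ [p.1] else acc.2.2))
      (a, b, c)
    = (a ++ ((((l.filter (fun p => p.2 ≤ 20)).filter (fun p => p.2 ≤ 10)).filter (fun p => p.2 ≤ 5)).map (·.1)),
       b ++ (((l.filter (fun p => p.2 ≤ 20)).filter (fun p => p.2 ≤ 10)).map (·.1)),
       c ++ ((l.filter (fun p => p.2 ≤ 20)).map (·.1))) := by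
  induction l generalizing a b c with
  | nil => simp
  | cons p t ih =>
    simp only [List.foldl_cons, List.filter_cons]
    by_cases h5 : p.2 ≤ 5
    · have h10 : p.2 ≤ 10 := by omega
      have h20 : p.2 ≤ 20 := by omega
      simp [h5, h10, h20, ih]
    · by_cases h10 : p.2 ≤ 10
      · have h20 : p.2 ≤ 20 := by omega
        simp [h5, h10, h20, ih]
      · by_cases h20 : p.2 ≤ 20
        · simp [h5, h10, h20, ih]
        · simp [h5, h10, h20, ih]

-- Filtering Counter(items).items by a bound on the count, then projecting the keys,
-- is filtering the deduplicated key list by the same bound on items.count.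
theorem pv_filter_items (s : List Int) (f : Int → Int) (c : Int) :
    (s.map (fun k => (k, f k))).filter (fun q => decide (q.2 ≤ c))
    = (s.filter (fun k => decide (f k ≤ c))).map (fun k => (k, f k)) := by
  induction s with
  | nil => rfl
  | cons x t ih => by_cases h : f x ≤ c <;> simp [h, ih]

-- ===== VERDICT (by name: the statement is the Claim_ definition above) =====
theorem calc_cold_items_list_spec : Claim_equal_calc_cold_items_list := by
  intro l _
  unfold Spec_calc_cold_items_list calc_cold_items_list calc_cold_items_list_alt
  simp only [pv_counts_eq_counter, pv_fold_eq_filters, List.nil_append,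
    PySem.Dict.items_counter, PySem.List.dedup_eq_ofList, ← PySem.List.count_eq,
    pv_filter_items, List.map_map, Function.comp_def, List.map_id']
  norm_cast
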